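-- pv_equiv track=rewrite | github.com/aplowman/atomistic-simulation | utils.py | repeat_elems_idx
-- ===== SOURCE A (Python) =====
-- def repeat_elems_idx(a):
--     """ Given a list of lists `a`, return a dict where each key is each unique
--         element in `a`, and each value is a list of sublist indices of that element.
--
--         E.g. a = [[1,1,2], [2,3], [4]] => {1:[0], 2:[0,1], 3:[1], 4:[2]}
--
--     """
--
--     indices = {}
--
--     for sblist_idx, sblist in enumerate(a):
--
--         for i in sblist:
--
--             if indices.get(i) is not None:
--
--                 if sblist_idx not in indices[i]:
--                     indices[i].append(sblist_idx)
--             else: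
--                 indices.update({i: [sblist_idx]})
--
--     return indices
-- ===== SOURCE B (Python) =====
-- def repeat_elems_idx(a):
--     """ Given a list of lists `a`, return a dict where each key is each unique
--         element in `a`, and each value is a list of sublist indices of that element.
--     """
--     keys = dict.fromkeys(x for sblist in a for x in sblist)
--     return {k: [idx for idx, sblist in enumerate(a) if k in sblist] for k in keys}
-- ===== Notes on version B (the rewrite author's own statement) =====
-- stated objective: alternative
-- what changed: B keeps no per-key accumulator at all: it computes the unique keys once via dict.fromkeys over the flattened input, then for each key a comprehension over enumerate(a) lists the sublist indices whose sublist contains it; A instead builds each key's index list incrementally inside a single nested pass with a 'not in' guard.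
import Mathlib
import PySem

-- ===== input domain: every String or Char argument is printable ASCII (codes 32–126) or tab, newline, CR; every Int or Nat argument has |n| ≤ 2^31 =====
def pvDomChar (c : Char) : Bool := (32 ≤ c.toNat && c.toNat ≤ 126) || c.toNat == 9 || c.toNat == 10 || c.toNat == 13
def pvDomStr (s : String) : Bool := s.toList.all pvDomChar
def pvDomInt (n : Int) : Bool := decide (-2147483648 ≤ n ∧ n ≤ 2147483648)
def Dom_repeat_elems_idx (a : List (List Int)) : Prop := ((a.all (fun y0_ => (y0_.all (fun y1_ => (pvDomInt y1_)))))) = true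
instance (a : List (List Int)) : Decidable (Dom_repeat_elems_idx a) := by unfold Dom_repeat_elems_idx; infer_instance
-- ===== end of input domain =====

-- B drops A's accumulating dict-of-lists entirely: it computes the unique keys once
-- (dict.fromkeys of the flattened input) and then, per key, lists by a comprehension the
-- sublist indices whose sublist contains it (objective: alternative; not faster).


-- ===== PORT A =====
-- body of A's inner loop: indices.get(i) check, 'sblist_idx not in indices[i]' scan, append / fresh insert
def pvAStep (sblist_idx : Int) (indices : PySem.Dict Int (List Int)) (i : Int) :
    PySem.Dict Int (List Int) :=
  match indices.get? i with
  | some l => if l.contains sblist_idx then indices else indices.insert i (l ++ [sblist_idx])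
  | none => indices.insert i [sblist_idx]

def repeat_elems_idx (a : List (List Int)) : List (Int × List Int) :=
  ((PySem.List.enumerate a 0).foldl
    (fun indices p => p.2.foldl (pvAStep p.1) indices) PySem.Dict.empty).items

-- ===== PORT B =====
-- keys = dict.fromkeys(x for sblist in a for x in sblist)
-- {k: [idx for idx, sblist in enumerate(a) if k in sblist] for k in keys}
def repeat_elems_idx_alt (a : List (List Int)) : List (Int × List Int) :=
  (PySem.List.dedup (a.flatMap (fun sblist => sblist))).map
    (fun k => (k, ((PySem.List.enumerate a 0).filter (fun p => p.2.contains k)).map (fun p => p.1)))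

-- ===== PRECONDITION & SPEC =====
def Spec_repeat_elems_idx (a : List (List Int)) (out : List (Int × List Int)) : Prop := out = repeat_elems_idx_alt a
instance (a : List (List Int)) (out : List (Int × List Int)) : Decidable (Spec_repeat_elems_idx a out) := by unfold Spec_repeat_elems_idx; infer_instance

-- ===== CLAIM (what is proved, stated in full; the proofs are below) =====
def Claim_equal_repeat_elems_idx : Prop := ∀ (a : List (List Int)), Dom_repeat_elems_idx a → Spec_repeat_elems_idx a (repeat_elems_idx a)

-- ===== LEMMAS AND PROOFS =====

-- keys: every branch of A's step adds i as with a set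
theorem pv_keys_step (n : Int) (d : PySem.Dict Int (List Int)) (i : Int) :
    (pvAStep n d i).keys = PySem.Set.add d.keys i := by
  unfold pvAStep
  cases h : d.get? i with
  | some l =>
    have hc : d.contains i = true := by rw [PySem.Dict.contains_eq_isSome_get?, h]; rfl
    have him : i ∈ d.keys := (PySem.Dict.contains_iff_mem_keys d i).mp hc
    cases hcl : l.contains n with
    | true =>
      have hnl : n ∈ l := by simpa using hcl
      simp [PySem.Set.add, hnl, him]
    | false =>
      have hnl : n ∉ l := by simpa using hcl
      simp [PySem.Set.add, hnl, him, PySem.Dict.keys_insert_of_contains _ _ hc]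
  | none =>
    have hc : d.contains i = false := by rw [PySem.Dict.contains_eq_isSome_get?, h]; rfl
    have hnm : i ∉ d.keys := fun hmem =>
      absurd ((PySem.Dict.contains_iff_mem_keys d i).mpr hmem) (by rw [hc]; exact Bool.false_ne_true)
    simp [PySem.Set.add, hnm, PySem.Dict.keys_insert_of_not_contains _ _ hc]

theorem pv_keys_inner (x : List Int) (n : Int) (d : PySem.Dict Int (List Int)) :
    (x.foldl (pvAStep n) d).keys = PySem.Set.update d.keys x := by
  induction x generalizing d with
  | nil => rfl
  | cons i t ih =>
    simp only [List.foldl_cons]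
    rw [ih, pv_keys_step]
    rfl

theorem pv_keys_outer (a : List (List Int)) : ∀ (s : Int) (d : PySem.Dict Int (List Int)),
    ((PySem.List.enumerate a s).foldl (fun d p => p.2.foldl (pvAStep p.1) d) d).keys
      = PySem.Set.update d.keys (a.flatMap (fun sblist => sblist)) := by
  induction a with
  | nil => intro s d; rfl
  | cons x t ih =>
    intro s d
    rw [PySem.List.enumerate_cons]
    simp only [List.foldl_cons, List.flatMap_cons]
    rw [ih (s + 1)]
    rw [pv_keys_inner]
    simp [PySem.Set.update, List.foldl_append]

-- per-key value: what A's step does to indices.get(k, [])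
theorem pv_getD_step (n : Int) (d : PySem.Dict Int (List Int)) (i k : Int) :
    (pvAStep n d i).getD k []
      = if k = i ∧ (d.getD k []).contains n = false then d.getD k [] ++ [n]
        else d.getD k [] := by
  unfold pvAStep
  cases h : d.get? i with
  | some l =>
    cases hcl : l.contains n with
    | true =>
      simp only [hcl, if_true]
      split_ifs with hcond
      · obtain ⟨hk, hcn⟩ := hcond
        rw [hk, PySem.Dict.getD_of_get?_eq_some _ _ h] at hcn
        rw [hcl] at hcn; cases hcn
      · rfl
    | false =>
      simp only [hcl, Bool.false_eq_true, if_false]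
      rw [PySem.Dict.getD_insert]
      by_cases hk : k = i
      · rw [if_pos hk, if_pos ⟨hk, by rw [hk, PySem.Dict.getD_of_get?_eq_some _ _ h]; exact hcl⟩,
          hk, PySem.Dict.getD_of_get?_eq_some _ _ h]
      · rw [if_neg hk, if_neg (fun hc => hk hc.1)]
  | none =>
    rw [PySem.Dict.getD_insert]
    by_cases hk : k = i
    · rw [if_pos hk, if_pos ⟨hk, by rw [hk, PySem.Dict.getD_of_get?_eq_none _ _ h]; rfl⟩,
        hk, PySem.Dict.getD_of_get?_eq_none _ _ h]
      rfl
    · rw [if_neg hk, if_neg (fun hc => hk hc.1)]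

-- if index n is already recorded for k, the inner loop never touches k's list again
theorem pv_getD_inner_stable (x : List Int) (n : Int) (d : PySem.Dict Int (List Int)) (k : Int)
    (h : (d.getD k []).contains n = true) :
    (x.foldl (pvAStep n) d).getD k [] = d.getD k [] := by
  induction x generalizing d with
  | nil => rfl
  | cons i t ih =>
    simp only [List.foldl_cons]
    have hstep : (pvAStep n d i).getD k [] = d.getD k [] := by
      rw [pv_getD_step]
      rw [if_neg (fun hc => by rw [h] at hc; cases hc.2)]
    rw [ih (pvAStep n d i) (by rw [hstep]; exact h), hstep]

-- the inner loop appends n to k's list exactly when the sublist contains k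
theorem pv_getD_inner (x : List Int) (n : Int) (d : PySem.Dict Int (List Int)) (k : Int)
    (h : (d.getD k []).contains n = false) :
    (x.foldl (pvAStep n) d).getD k []
      = d.getD k [] ++ (if x.contains k then [n] else []) := by
  induction x generalizing d with
  | nil => simp
  | cons i t ih =>
    simp only [List.foldl_cons]
    by_cases hk : k = i
    · have hstep : (pvAStep n d i).getD k [] = d.getD k [] ++ [n] := by
        rw [pv_getD_step, if_pos ⟨hk, h⟩]
      have hcn : ((pvAStep n d i).getD k []).contains n = true := by
        rw [hstep]; simp
      rw [pv_getD_inner_stable t n _ k hcn, hstep]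
      have : (i :: t).contains k = true := by simp [hk]
      rw [this, if_pos rfl]
    · have hstep : (pvAStep n d i).getD k [] = d.getD k [] := by
        rw [pv_getD_step, if_neg (fun hc => hk hc.1)]
      rw [ih _ (by rw [hstep]; exact h), hstep]
      simp [hk]

-- the outer loop appends, for key k, exactly the indices of sublists containing k
theorem pv_getD_outer (a : List (List Int)) : ∀ (s : Int) (d : PySem.Dict Int (List Int)) (k : Int),
    (∀ m ∈ d.getD k [], m < s) →
    ((PySem.List.enumerate a s).foldl (fun d p => p.2.foldl (pvAStep p.1) d) d).getD k []
      = d.getD k []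
        ++ ((PySem.List.enumerate a s).filter (fun p => p.2.contains k)).map (fun p => p.1) := by
  induction a with
  | nil => intro s d k _; simp [PySem.List.enumerate_nil]
  | cons x t ih =>
    intro s d k hlt
    rw [PySem.List.enumerate_cons]
    simp only [List.foldl_cons]
    have hcf : (d.getD k []).contains s = false := by
      rw [← Bool.not_eq_true, List.contains_iff_mem]
      intro hmem
      exact absurd (hlt s hmem) (lt_irrefl s)
    have hstep := pv_getD_inner x s d k hcf
    have hlt' : ∀ m ∈ (x.foldl (pvAStep s) d).getD k [], m < s + 1 := by
      intro m hm
      rw [hstep] at hm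
      rcases List.mem_append.mp hm with h1 | h1
      · exact lt_trans (hlt m h1) (by omega)
      · split_ifs at h1 with hc
        · rw [List.mem_singleton] at h1; omega
        · cases h1
    rw [ih (s + 1) _ k hlt', hstep, List.filter_cons]
    by_cases hc : k ∈ x
    · simp [hc, List.append_assoc]
    · simp [hc]

-- ===== VERDICT (by name: the statement is the Claim_ definition above) =====
theorem repeat_elems_idx_spec : Claim_equal_repeat_elems_idx := by
  intro a _
  unfold Spec_repeat_elems_idx repeat_elems_idx repeat_elems_idx_alt
  set dA := (PySem.List.enumerate a 0).foldl
    (fun indices p => p.2.foldl (pvAStep p.1) indices) PySem.Dict.empty with hdA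
  have hkeys : dA.keys = PySem.List.dedup (a.flatMap (fun sblist => sblist)) := by
    rw [hdA, pv_keys_outer a 0 PySem.Dict.empty]
    simp [PySem.Dict.keys_empty, PySem.Set.update_nil_left]
  have hnd : dA.keys.Nodup := by rw [hkeys]; exact PySem.List.nodup_dedup _
  rw [PySem.Dict.items_eq_map_keys dA hnd [], hkeys]
  apply List.map_congr_left
  intro k _
  have := pv_getD_outer a 0 PySem.Dict.empty k (by simp [PySem.Dict.getD_empty])
  rw [hdA, this]
  simp [PySem.Dict.getD_empty]
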